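-- pv_equiv track=rewrite | github.com/Thejshri-A/Python-1000 | 558. Precipitation Intensity.py | precipitation_intensity
-- ===== SOURCE A (Python) =====
-- def precipitation_intensity(precipitation):
--     classify=[]
--     for val in precipitation:
--         if val<2:
--             classify.append("Light")
--         elif val<10:
--             classify.append("Moderate")
--         else:
--             classify.append("Heavy")
--     return classify
-- ===== SOURCE B (Python) =====
-- def precipitation_intensity(precipitation):
--     classify = ["Light"] * len(precipitation)
--     for i, val in enumerate(precipitation):
--         if val >= 2:
--             classify[i] = "Moderate"
--     for i, val in enumerate(precipitation):
--         if val >= 10: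
--             classify[i] = "Heavy"
--     return classify
-- ===== Notes on version B (the rewrite author's own statement) =====
-- stated objective: alternative
-- what changed: Replaces the single-pass if/elif/else cascade with layered painting: the output starts all 'Light', a second pass overwrites indices with val>=2 to 'Moderate', and a third pass overwrites indices with val>=10 to 'Heavy'; no three-way branch remains.
import Mathlib
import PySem

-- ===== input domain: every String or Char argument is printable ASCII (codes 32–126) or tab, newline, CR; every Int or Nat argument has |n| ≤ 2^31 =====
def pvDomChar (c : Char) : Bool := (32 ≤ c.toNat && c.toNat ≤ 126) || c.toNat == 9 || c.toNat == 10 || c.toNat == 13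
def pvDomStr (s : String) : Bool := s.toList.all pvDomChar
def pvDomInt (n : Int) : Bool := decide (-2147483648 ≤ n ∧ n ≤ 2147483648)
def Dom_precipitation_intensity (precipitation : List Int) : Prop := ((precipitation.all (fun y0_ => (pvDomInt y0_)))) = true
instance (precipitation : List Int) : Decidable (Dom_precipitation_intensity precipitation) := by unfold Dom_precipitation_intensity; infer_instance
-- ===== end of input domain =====

-- B paints the output in stages (all "Light", then overwrite >=2 to "Moderate", then >=10 to "Heavy")
-- instead of A's one-pass three-way branch (objective: alternative, same cost).


-- ===== PORT A =====
-- loop appending by the if/elif/else cascade, as in A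
def precipitation_intensity (precipitation : List Int) : List String :=
  precipitation.foldl (fun classify val =>
    if val < 2 then classify ++ ["Light"]
    else if val < 10 then classify ++ ["Moderate"]
    else classify ++ ["Heavy"]) []

-- ===== PORT B =====
-- one overwrite pass 'for i, val in enumerate(precipitation): if cond: classify[i] = lbl'
def pvPaint (precipitation : List Int) (cond : Int → Bool) (lbl : String)
    (classify : List String) : List String :=
  (PySem.List.enumerate precipitation).foldl
    (fun o iv => if cond iv.2 then PySem.List.pySetD o iv.1 lbl else o) classify

def precipitation_intensity_alt (precipitation : List Int) : List String :=
  let classify := List.replicate precipitation.length "Light"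
  let classify := pvPaint precipitation (fun v => v ≥ 2) "Moderate" classify
  pvPaint precipitation (fun v => v ≥ 10) "Heavy" classify

-- ===== PRECONDITION & SPEC =====
def Spec_precipitation_intensity (precipitation : List Int) (out : List String) : Prop := out = precipitation_intensity_alt precipitation
instance (precipitation : List Int) (out : List String) : Decidable (Spec_precipitation_intensity precipitation out) := by unfold Spec_precipitation_intensity; infer_instance

-- ===== CLAIM (what is proved, stated in full; the proofs are below) =====
def Claim_equal_precipitation_intensity : Prop := ∀ (precipitation : List Int), Dom_precipitation_intensity precipitation → Spec_precipitation_intensity precipitation (precipitation_intensity precipitation)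

-- ===== LEMMAS AND PROOFS =====
-- A's loop builds the map of the cascade
theorem foldl_acc (xs : List Int) (acc : List String) :
    xs.foldl (fun classify val =>
      if val < 2 then classify ++ ["Light"]
      else if val < 10 then classify ++ ["Moderate"]
      else classify ++ ["Heavy"]) acc
      = acc ++ xs.map (fun v => if v < 2 then "Light" else if v < 10 then "Moderate" else "Heavy") := by
  induction xs generalizing acc with
  | nil => simp
  | cons x xs ih =>
    simp only [List.foldl_cons, List.map_cons]
    split_ifs <;> rw [ih] <;> simp

-- one paint pass, started at offset pre.length, zips the condition over the suffix
theorem pvPaint_eq (cond : Int → Bool) (lbl : String) (xs : List Int)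
    (pre suf : List String) (h : suf.length = xs.length) :
    (PySem.List.enumerate xs (pre.length : Int)).foldl
        (fun o iv => if cond iv.2 then PySem.List.pySetD o iv.1 lbl else o) (pre ++ suf)
      = pre ++ List.zipWith (fun v s => if cond v then lbl else s) xs suf := by
  induction xs generalizing pre suf with
  | nil => cases suf <;> simp_all
  | cons x xs ih =>
    cases suf with
    | nil => simp at h
    | cons s0 ss =>
      simp only [PySem.List.enumerate_cons, List.foldl_cons, List.zipWith_cons_cons]
      have hset : (if cond x then PySem.List.pySetD (pre ++ s0 :: ss) (pre.length : Int) lbl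
                   else pre ++ s0 :: ss)
          = (pre ++ [if cond x then lbl else s0]) ++ ss := by
        split_ifs with hc
        · rw [PySem.List.pySetD_natCast]
          simp
        · simp
      rw [hset]
      have hlen : ((pre.length : Int) + 1) = (((pre ++ [if cond x then lbl else s0]).length : Nat) : Int) := by
        simp
      rw [hlen, ih]
      · simp
      · simpa using h

theorem pvPaint_zero (cond : Int → Bool) (lbl : String) (xs : List Int)
    (suf : List String) (h : suf.length = xs.length) :
    pvPaint xs cond lbl suf = List.zipWith (fun v s => if cond v then lbl else s) xs suf := by
  have := pvPaint_eq cond lbl xs [] suf h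
  simpa [pvPaint] using this

-- the two layered passes over the all-"Light" base give the cascade pointwise
theorem layers_eq_map (xs : List Int) :
    List.zipWith (fun v s => if (v ≥ 10 : Bool) then "Heavy" else s) xs
      (List.zipWith (fun v s => if (v ≥ 2 : Bool) then "Moderate" else s) xs
        (List.replicate xs.length "Light"))
    = xs.map (fun v => if v < 2 then "Light" else if v < 10 then "Moderate" else "Heavy") := by
  induction xs with
  | nil => simp
  | cons x xs ih =>
    simp only [List.length_cons, List.replicate_succ, List.zipWith_cons_cons, List.map_cons, ih]
    congr 1
    by_cases h2 : (2:Int) ≤ x <;> by_cases h10 : (10:Int) ≤ x <;>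
      simp [h2, h10, show (x < 2) ↔ ¬(2 ≤ x) by omega,
            show (x < 10) ↔ ¬(10 ≤ x) by omega]
    omega

-- ===== VERDICT (by name: the statement is the Claim_ definition above) =====
theorem precipitation_intensity_spec : Claim_equal_precipitation_intensity := by
  intro xs _
  unfold Spec_precipitation_intensity precipitation_intensity
  show _ = pvPaint xs (fun v => v ≥ 10) "Heavy"
      (pvPaint xs (fun v => v ≥ 2) "Moderate" (List.replicate xs.length "Light"))
  rw [foldl_acc, List.nil_append,
      pvPaint_zero (fun v => v ≥ 2) "Moderate" _ _ (by simp),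
      pvPaint_zero (fun v => v ≥ 10) "Heavy" _ _ (by simp),
      layers_eq_map]
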